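-- pv_equiv track=rewrite | github.com/chaichontat/advent-of-code | python/y2022/day25.py | stepup
-- ===== SOURCE A (Python) =====
-- SN = "=-012"
--
-- def stepup(snafu: str):
--     if len(snafu) > 1 and snafu.startswith("0"):
--         return stepup(snafu[1:])
--     if snafu == "2":
--         return "1="
--     if snafu == "":
--         return "1"
--     if (c := snafu[-1]) in SN[:-1]:
--         return snafu[:-1] + SN[SN.index(c) + 1]
--     return stepup(snafu[:-1]) + "="
-- ===== SOURCE B (Python) =====
-- SN = "=-012"
--
-- def stepup(snafu: str):
--     # drop leading zeros while more than one character remains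
--     i = 0
--     while i < len(snafu) - 1 and snafu[i] == "0":
--         i += 1
--     s = snafu[i:]
--     # single right-to-left pass: trailing chars outside "=-01" each become "="
--     j = len(s)
--     while j > 0 and s[j - 1] not in "=-01":
--         j -= 1
--     if j == 0:
--         return "1" + "=" * len(s)
--     return s[:j - 1] + SN[SN.index(s[j - 1]) + 1] + "=" * (len(s) - j)
-- ===== Notes on version B (the rewrite author's own statement) =====
-- stated objective: faster
-- what changed: Replaced A's O(n^2) recursion (each step slices a copy of the string and recurses) by a single right-to-left scan with explicit indices that builds the result once.
import Mathlib
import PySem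

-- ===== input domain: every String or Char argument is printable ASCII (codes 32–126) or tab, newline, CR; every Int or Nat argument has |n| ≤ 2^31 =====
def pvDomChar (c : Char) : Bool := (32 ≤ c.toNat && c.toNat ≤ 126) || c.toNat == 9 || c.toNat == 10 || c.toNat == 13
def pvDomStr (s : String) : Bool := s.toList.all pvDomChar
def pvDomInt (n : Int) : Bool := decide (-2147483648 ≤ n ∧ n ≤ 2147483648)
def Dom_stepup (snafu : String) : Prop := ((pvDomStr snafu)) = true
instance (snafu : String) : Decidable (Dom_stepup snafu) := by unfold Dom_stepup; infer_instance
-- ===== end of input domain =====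

-- B replaces A's quadratic slice-and-recurse with one right-to-left pass building the result once (objective: faster).


-- ===== PORT A =====
-- SN = "=-012"
def pvSN : List Char := ['=', '-', '0', '1', '2']

-- literal transliteration of A on List Char:
--   snafu[1:] = tail, snafu[:-1] = dropLast, snafu.startswith("0") = head? test,
--   snafu[-1] = getLastD (the branch is only reached with snafu ≠ ""),
--   SN[:-1] = pvSN.dropLast, SN[SN.index(c)+1] = pvSN.getD (pvSN.idxOf c + 1)
def stepupCore (s : List Char) : List Char :=
  if 1 < s.length ∧ s.head? = some '0' then
    stepupCore s.tail
  else if s = ['2'] then ['1', '=']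
  else if s = [] then ['1']
  else
    let c := s.getLastD ' '
    if c ∈ pvSN.dropLast then
      s.dropLast ++ [pvSN.getD (pvSN.idxOf c + 1) ' ']
    else
      stepupCore s.dropLast ++ ['=']
termination_by s.length
decreasing_by
  · cases s <;> simp_all
  · cases s <;> simp_all

def stepup (snafu : String) : String := String.ofList (stepupCore snafu.toList)

-- ===== PORT B =====
-- Source B's leading-zero strip (while i < len-1 and snafu[i] == "0")
def stripZeros (s : List Char) : List Char :=
  match s with
  | c :: rest@(_ :: _) => if c = '0' then stripZeros rest else c :: rest
  | _ => s

-- Source B's single right-to-left scan: walk the reversed list, each trailing char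
-- outside "=-01" contributes one '=', the first char inside it is bumped.
def bumpRev (rev : List Char) (eqs : List Char) : List Char :=
  match rev with
  | [] => '1' :: eqs
  | c :: rest =>
    if c ∈ pvSN.dropLast then
      rest.reverse ++ pvSN.getD (pvSN.idxOf c + 1) ' ' :: eqs
    else
      bumpRev rest ('=' :: eqs)

def stepup_alt (snafu : String) : String :=
  String.ofList (bumpRev (stripZeros snafu.toList).reverse [])

-- ===== PRECONDITION & SPEC =====
def Spec_stepup (snafu : String) (out : String) : Prop := out = stepup_alt snafu
instance (snafu : String) (out : String) : Decidable (Spec_stepup snafu out) := by unfold Spec_stepup; infer_instance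

-- ===== CLAIM (what is proved, stated in full; the proofs are below) =====
def Claim_equal_stepup : Prop := ∀ (snafu : String), Dom_stepup snafu → Spec_stepup snafu (stepup snafu)

-- ===== LEMMAS AND PROOFS =====

-- A strips leading zeros exactly like stripZeros does
theorem stepupCore_stripZeros (s : List Char) :
    stepupCore s = stepupCore (stripZeros s) := by
  induction s with
  | nil => simp [stripZeros]
  | cons c rest ih =>
    cases rest with
    | nil => simp [stripZeros]
    | cons c2 rest' =>
      by_cases hc : c = '0'
      · subst hc
        rw [stepupCore]
        simp only [stripZeros]
        rw [if_pos (by simp)]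
        simpa using ih
      · simp [stripZeros, hc]

theorem stripZeros_stripped (s : List Char) :
    ¬ (1 < (stripZeros s).length ∧ (stripZeros s).head? = some '0') := by
  induction s with
  | nil => simp [stripZeros]
  | cons c rest ih =>
    cases rest with
    | nil => simp [stripZeros]
    | cons c2 rest' =>
      by_cases hc : c = '0'
      · subst hc; simpa [stripZeros] using ih
      · simp [stripZeros, hc]

theorem bumpRev_eqs (rev : List Char) (eqs : List Char) :
    bumpRev rev eqs = bumpRev rev [] ++ eqs := by
  induction rev generalizing eqs with
  | nil => rfl
  | cons c rest ih =>
    by_cases h : c ∈ pvSN.dropLast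
    · simp [bumpRev, h]
    · rw [bumpRev, if_neg h, bumpRev, if_neg h, ih ('=' :: eqs), ih ['=']]
      simp

theorem stepupCore_eq_bumpRev (s : List Char)
    (hs : ¬ (1 < s.length ∧ s.head? = some '0')) :
    stepupCore s = bumpRev s.reverse [] := by
  induction s using List.reverseRecOn with
  | nil => rw [stepupCore]; rfl
  | append_singleton xs x ih =>
    rw [stepupCore, if_neg hs]
    by_cases h2 : xs ++ [x] = ['2']
    · rw [if_pos h2]
      have hxs : xs = [] := by
        have hl := congrArg List.length h2
        simp at hl
        exact hl
      subst hxs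
      have hxx : x = '2' := by simpa using h2
      subst hxx
      rfl
    · rw [if_neg h2, if_neg (by simp)]
      have hlast : (xs ++ [x]).getLastD ' ' = x := by simp
      rw [List.reverse_append]
      simp only [List.reverse_cons, List.reverse_nil, List.nil_append, List.cons_append]
      by_cases hmem : x ∈ pvSN.dropLast
      · simp only [hlast, bumpRev, if_pos hmem]
        simp
      · simp only [hlast, bumpRev, if_neg hmem]
        rw [bumpRev_eqs]
        have hxs : ¬ (1 < xs.length ∧ xs.head? = some '0') := by
          rintro ⟨hl, hh⟩
          apply hs
          constructor
          · simp; omega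
          · cases xs with
            | nil => simp at hl
            | cons a as => simpa using hh
        rw [List.dropLast_concat, ih hxs]

-- ===== VERDICT (by name: the statement is the Claim_ definition above) =====
theorem stepup_spec : Claim_equal_stepup := by
  intro snafu _
  unfold Spec_stepup stepup stepup_alt
  rw [stepupCore_stripZeros,
      stepupCore_eq_bumpRev _ (stripZeros_stripped snafu.toList)]
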